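-- pv_equiv track=rewrite | github.com/pypi-data/pypi-mirror-130 | packages/lightning-grid/lightning-grid-0.6.1.tar.gz/lightning-grid-0.6.1/grid/cli/cli/grid_run.py | _parse_script_args
-- ===== SOURCE A (Python) =====
-- from typing import Any, Dict, List, Optional
--
-- def _get_flag_args_for_grid_run() -> List[str]:
--     return ['--', '--ignore_warnings', '--localdir', '--use_spot']
--
-- def _parse_script_args(args):
--     """Small state machine to parse the script name and script args __before__ the click parser is called."""
--     flags = _get_flag_args_for_grid_run()
--
--     # states: 'parameter_name', 'parameter_value', 'flag', 'script_name', 'script_arg'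
--     state = None
--
--     click_args = []
--     script_name = None
--     script_args = []
--     for arg in args:
--         arg = str(arg)
--         if state in ['script_name', 'script_arg']:
--             script_args.append(arg)
--         else:
--             if arg.startswith('--'):
--                 if arg in flags:
--                     state = 'flag'
--                 else:
--                     state = 'parameter_name'
--             elif state == 'parameter_name':
--                 state = 'parameter_value'
--             else:
--                 state = 'script_name'
--                 script_name = arg
--
--             if state != 'script_name':
--                 click_args.append(arg)
--     return click_args, script_name, script_args
-- ===== SOURCE B (Python) =====
-- def _parse_script_args(args):
--     """Locate the split point (first arg that becomes the script name), then slice."""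
--     flags = {'--', '--ignore_warnings', '--localdir', '--use_spot'}
--     expecting_value = False
--     split = len(args)
--     for i, arg in enumerate(args):
--         arg = str(arg)
--         if arg.startswith('--'):
--             expecting_value = arg not in flags
--         elif expecting_value:
--             expecting_value = False
--         else:
--             split = i
--             break
--     click_args = [str(a) for a in args[:split]]
--     script_name = str(args[split]) if split < len(args) else None
--     script_args = [str(a) for a in args[split + 1:]]
--     return click_args, script_name, script_args
-- ===== Notes on version B (the rewrite author's own statement) =====
-- stated objective: alternative
-- what changed: B replaces A's single-pass state machine with three accumulators by a locate-then-slice structure: a boolean-state loop only finds the split index of the script name, and the three outputs are produced by slicing around it.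
import Mathlib
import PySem

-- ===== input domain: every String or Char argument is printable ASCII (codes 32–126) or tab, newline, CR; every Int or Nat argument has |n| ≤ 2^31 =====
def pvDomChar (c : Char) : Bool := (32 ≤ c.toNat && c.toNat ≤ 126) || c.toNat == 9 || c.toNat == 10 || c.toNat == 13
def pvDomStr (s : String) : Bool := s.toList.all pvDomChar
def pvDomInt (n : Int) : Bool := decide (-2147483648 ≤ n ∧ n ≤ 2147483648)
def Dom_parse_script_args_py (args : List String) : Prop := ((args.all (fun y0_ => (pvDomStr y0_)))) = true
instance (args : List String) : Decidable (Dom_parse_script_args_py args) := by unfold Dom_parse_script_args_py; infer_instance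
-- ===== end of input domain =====

-- B replaces A's one-pass state machine (three accumulators) by locate-then-slice:
-- a boolean-state loop finds the split index; the outputs are slices around it.
-- On the stated domain the arguments are strings, so Python's str(arg) is the identity.

-- ===== PORT A =====
-- the flag list _get_flag_args_for_grid_run()
def pvFlags : List String := ["--", "--ignore_warnings", "--localdir", "--use_spot"]

-- one iteration of A's for-loop; state is the Option String of A's `state` variable
def pvStepA (st : Option String × List String × Option String × List String) (arg : String) :
    Option String × List String × Option String × List String :=
  let (state, click_args, script_name, script_args) := st
  if state = some "script_name" ∨ state = some "script_arg" then
    (state, click_args, script_name, script_args ++ [arg])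
  else
    let (state, script_name) :=
      if PySem.Str.startswith arg "--" then
        if pvFlags.contains arg then (some "flag", script_name)
        else (some "parameter_name", script_name)
      else if state = some "parameter_name" then (some "parameter_value", script_name)
      else (some "script_name", some arg)
    if state ≠ some "script_name" then (state, click_args ++ [arg], script_name, script_args)
    else (state, click_args, script_name, script_args)

def parse_script_args_py (args : List String) : List String × Option String × List String :=
  let r := args.foldl pvStepA (none, [], none, [])
  r.2

-- ===== PORT B =====
-- the locate loop of Source B: returns the break index i, or len(args) if the loop finishes
def pvFindSplit : List String → Bool → Nat
  | [], _ => 0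
  | a :: rest, expecting =>
    if PySem.Str.startswith a "--" then pvFindSplit rest (!pvFlags.contains a) + 1
    else if expecting then pvFindSplit rest false + 1
    else 0

def parse_script_args_py_alt (args : List String) : List String × Option String × List String :=
  let split := pvFindSplit args false
  -- args[:split], args[split] if in range else None, args[split+1:]  (nonnegative slices)
  (args.take split, args[split]?, args.drop (split + 1))

-- ===== PRECONDITION & SPEC =====
def Spec_parse_script_args_py (args : List String) (out : List String × Option String × List String) : Prop := out = parse_script_args_py_alt args
instance (args : List String) (out : List String × Option String × List String) : Decidable (Spec_parse_script_args_py args out) := by unfold Spec_parse_script_args_py; infer_instance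

-- ===== CLAIM (what is proved, stated in full; the proofs are below) =====
def Claim_equal_parse_script_args_py : Prop := ∀ (args : List String), Dom_parse_script_args_py args → Spec_parse_script_args_py args (parse_script_args_py args)

-- ===== LEMMAS AND PROOFS =====

-- once A's state is 'script_name', the rest of the fold only appends to script_args
theorem pvFoldA_script (l : List String) (click : List String) (name : Option String)
    (sargs : List String) :
    l.foldl pvStepA (some "script_name", click, name, sargs)
      = (some "script_name", click, name, sargs ++ l) := by
  induction l generalizing sargs with
  | nil => simp
  | cons a rest ih => simp [pvStepA, ih]

-- the main invariant: from any pre-script state, the fold produces B's slices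
theorem pvFoldA_pre (l : List String) (st : Option String) (click : List String)
    (h1 : st ≠ some "script_name") (h2 : st ≠ some "script_arg") :
    (l.foldl pvStepA (st, click, none, [])).2
      = (click ++ l.take (pvFindSplit l (st = some "parameter_name")),
         l[pvFindSplit l (st = some "parameter_name")]?,
         l.drop (pvFindSplit l (st = some "parameter_name") + 1)) := by
  induction l generalizing st click with
  | nil => simp [pvFindSplit]
  | cons a rest ih =>
    by_cases hs : PySem.Chars.startswith a.toList ['-', '-'] = true
    · by_cases hf : a ∈ pvFlags
      · have := ih (some "flag") (click ++ [a]) (by decide) (by decide)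
        simp [List.foldl_cons, pvStepA, PySem.Str.startswith, h1, h2, hs, hf, pvFindSplit, this]
      · have := ih (some "parameter_name") (click ++ [a]) (by decide) (by decide)
        simp [List.foldl_cons, pvStepA, PySem.Str.startswith, h1, h2, hs, hf, pvFindSplit, this]
    · by_cases hp : st = some "parameter_name"
      · have := ih (some "parameter_value") (click ++ [a]) (by decide) (by decide)
        simp [List.foldl_cons, pvStepA, PySem.Str.startswith, hs, hp, pvFindSplit, this]
      · simp [List.foldl_cons, pvStepA, PySem.Str.startswith, h1, h2, hs, hp, pvFindSplit, pvFoldA_script]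

-- ===== VERDICT (by name: the statement is the Claim_ definition above) =====
theorem parse_script_args_py_spec : Claim_equal_parse_script_args_py := by
  intro args _
  show parse_script_args_py args = parse_script_args_py_alt args
  have := pvFoldA_pre args none [] (by decide) (by decide)
  simpa [parse_script_args_py, parse_script_args_py_alt] using this
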